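-- pv_equiv track=rewrite | github.com/pypi-data/pypi-mirror-194 | packages/KiwiCoder/KiwiCoder-0.2.3.tar.gz/KiwiCoder-0.2.3/kiwi/core/step.py | parent_step
-- ===== SOURCE A (Python) =====
-- def parent_step(step_num: str) -> str:
--     seq_nums_list = step_num.split('.')
--     if len(seq_nums_list) == 1:
--         return "0"
--     parent_key = ""
--     for i in range(0, len(seq_nums_list) - 1):
--         parent_key += seq_nums_list[i] + "."
--     return parent_key[:-1]
-- ===== SOURCE B (Python) =====
-- def parent_step(step_num: str) -> str:
--     idx = step_num.rfind('.')
--     if idx == -1: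
--         return "0"
--     return step_num[:idx]
-- ===== Notes on version B (the rewrite author's own statement) =====
-- stated objective: idiomatic
-- what changed: B locates the final dot delimiter with str.rfind and slices the prefix once, instead of splitting the string into a segment list and rebuilding all-but-last segments with a concatenating loop.
import Mathlib
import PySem

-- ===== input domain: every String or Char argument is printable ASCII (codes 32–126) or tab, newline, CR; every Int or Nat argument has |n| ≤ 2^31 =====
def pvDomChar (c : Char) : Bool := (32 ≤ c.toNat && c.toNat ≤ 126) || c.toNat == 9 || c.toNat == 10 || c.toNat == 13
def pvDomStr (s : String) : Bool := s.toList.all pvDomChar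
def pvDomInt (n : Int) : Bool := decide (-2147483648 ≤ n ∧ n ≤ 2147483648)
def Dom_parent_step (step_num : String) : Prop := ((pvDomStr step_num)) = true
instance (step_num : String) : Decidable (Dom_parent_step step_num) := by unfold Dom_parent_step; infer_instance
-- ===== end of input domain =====

-- B locates the final dot delimiter with str.rfind and slices the prefix once, instead of
-- splitting into segments and rebuilding all-but-last with a concatenating loop (idiomatic).


-- ===== PORT A =====
-- strings handled as their code-point lists via PySem.Chars (exact for str.split / += / [:-1])
def parent_step (step_num : String) : String :=
  let seq_nums_list := PySem.Chars.splitOn step_num.toList ['.']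
  if seq_nums_list.length == 1 then "0"
  else
    let parent_key :=
      (PySem.List.pyRange 0 ((seq_nums_list.length : Int) - 1) 1).foldl
        (fun pk i => pk ++ PySem.List.pyGetD seq_nums_list i [] ++ ['.']) ([] : List Char)
    String.ofList (PySem.Chars.slice parent_key none (some (-1)))

-- ===== PORT B =====
def parent_step_alt(step_num : String) : String :=
  let idx := PySem.Str.rfind step_num "."
  if idx == -1 then "0" else PySem.Str.slice step_num none (some idx)

-- ===== PRECONDITION & SPEC =====
def Spec_parent_step (step_num : String) (out : String) : Prop := out = parent_step_alt step_num
instance (step_num : String) (out : String) : Decidable (Spec_parent_step step_num out) := by unfold Spec_parent_step; infer_instance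

-- ===== CLAIM (what is proved, stated in full; the proofs are below) =====
def Claim_equal_parent_step : Prop := ∀ (step_num : String), Dom_parent_step step_num → Spec_parent_step step_num (parent_step step_num)

-- ===== LEMMAS AND PROOFS =====
def csplit : List Char → List (List Char)
  | [] => [[]]
  | c :: rest =>
    if c = '.' then [] :: csplit rest
    else match csplit rest with
      | [] => [[c]]
      | p :: ps => (c :: p) :: ps

theorem csplit_ne_nil (cs : List Char) : csplit cs ≠ [] := by
  cases cs with
  | nil => simp [csplit]
  | cons c rest =>
    simp only [csplit]
    split
    · simp
    · cases h : csplit rest <;> simp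

theorem splitOn_go_eq (fuel : Nat) :
    ∀ (l cur : List Char) (accl : List (List Char)), l.length < fuel →
      PySem.Chars.splitOn.go ['.'] fuel l cur accl =
        accl.reverse ++ (match csplit l with
          | [] => [cur.reverse]
          | p :: ps => (cur.reverse ++ p) :: ps) := by
  induction fuel with
  | zero => intro l cur accl h; omega
  | succ f ih =>
    intro l cur accl h
    cases l with
    | nil =>
      simp [PySem.Chars.splitOn.go, csplit]
    | cons c rest =>
      rw [PySem.Chars.splitOn.go]
      by_cases hc : c = '.'
      · subst hc
        have hpre : List.isPrefixOf ['.'] ('.' :: rest) = true := by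
          simp [List.isPrefixOf]
        simp only [hpre, if_pos, List.length_cons, List.drop_succ_cons, List.length_nil, List.drop_zero]
        rw [ih rest [] ((cur.reverse) :: accl) (by simpa using Nat.lt_of_succ_lt_succ h)]
        simp [csplit]
        cases hs : csplit rest with
        | nil => exact absurd hs (csplit_ne_nil rest)
        | cons p ps => simp
      · have hpre : List.isPrefixOf ['.'] (c :: rest) = false := by
          simp [List.isPrefixOf]
          intro hh; exact hc hh.symm
        simp only [hpre]
        rw [ih rest (c :: cur) accl (by simpa using Nat.lt_of_succ_lt_succ h)]
        simp only [csplit, if_neg hc]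
        cases hs : csplit rest with
        | nil => exact absurd hs (csplit_ne_nil rest)
        | cons p ps => simp

theorem splitOn_eq_csplit (cs : List Char) :
    PySem.Chars.splitOn cs ['.'] = csplit cs := by
  rw [PySem.Chars.splitOn, splitOn_go_eq (cs.length + 1) cs [] [] (by omega)]
  cases hs : csplit cs with
  | nil => exact absurd hs (csplit_ne_nil cs)
  | cons p ps => simp

def lastDot? : List Char → Option Nat
  | [] => none
  | c :: rest =>
    match lastDot? rest with
    | some k => some (k + 1)
    | none => if c = '.' then some 0 else none

theorem lastDot?_append_singleton (xs : List Char) (c : Char) :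
    lastDot? (xs ++ [c]) = if c = '.' then some xs.length else lastDot? xs := by
  induction xs with
  | nil => simp [lastDot?]
  | cons x xs ih =>
    by_cases hc : c = '.'
    · subst hc; simp [List.cons_append, lastDot?, ih]
    · simp [List.cons_append, lastDot?, ih, hc]

theorem rfind_go_eq (cs : List Char) :
    ∀ j : Nat, j ≤ cs.length →
      PySem.Chars.rfind.go cs ['.'] j =
        (match lastDot? (cs.take (j + 1)) with
          | some k => (k : Int)
          | none => -1) := by
  intro j
  induction j with
  | zero =>
    intro _
    rw [PySem.Chars.rfind.go]
    cases cs with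
    | nil => simp [lastDot?]
    | cons c rest =>
      by_cases hc : c = '.'
      · simp [List.isPrefixOf_cons₂, hc, lastDot?]
      · have hc' : ('.' : Char) ≠ c := fun h => hc h.symm
        simp [List.isPrefixOf_cons₂, hc', hc, lastDot?]
  | succ j ih =>
    intro hj
    rw [PySem.Chars.rfind.go]
    by_cases hlt : j + 1 < cs.length
    · have htake : cs.take (j + 2) = cs.take (j + 1) ++ [cs[j+1]] := by
        rw [List.take_succ]
        simp [List.getElem?_eq_getElem hlt]
      by_cases hc : cs[j+1] = '.'
      · have hpre : List.isPrefixOf ['.'] (List.drop (j+1) cs) = true := by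
          have : List.drop (j+1) cs = cs[j+1] :: List.drop (j+2) cs := List.drop_eq_getElem_cons hlt
          simp [this, List.isPrefixOf_cons₂, hc]
        rw [htake, lastDot?_append_singleton]
        simp [hpre, hc, List.length_take, Nat.min_eq_left (le_of_lt hlt)]
      · have hpre : List.isPrefixOf ['.'] (List.drop (j+1) cs) = false := by
          have : List.drop (j+1) cs = cs[j+1] :: List.drop (j+2) cs := List.drop_eq_getElem_cons hlt
          have hc' : ('.' : Char) ≠ cs[j+1] := fun h => hc h.symm
          rw [this, List.isPrefixOf_cons₂]
          simp [hc']
        rw [htake, lastDot?_append_singleton, if_neg hc]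
        simp only [hpre, Bool.false_eq_true, if_false]
        exact ih (by omega)
    · have hlen : j + 1 = cs.length := by omega
      have hpre : List.isPrefixOf ['.'] (List.drop (j+1) cs) = false := by
        rw [List.drop_of_length_le (by omega)]; simp [List.isPrefixOf]
      have h2 : cs.take (j + 2) = cs.take (j + 1) := by
        rw [List.take_of_length_le (by omega), List.take_of_length_le (by omega)]
      simp only [hpre, Bool.false_eq_true, if_false, h2]
      exact ih (by omega)

theorem rfind_eq_lastDot (cs : List Char) :
    PySem.Chars.rfind cs ['.'] =
      (match lastDot? cs with | some k => (k : Int) | none => -1) := by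
  rw [PySem.Chars.rfind, rfind_go_eq cs cs.length le_rfl,
    List.take_of_length_le (by omega)]

def interDot : List (List Char) → List Char
  | [] => []
  | [p] => p
  | p :: q :: qs => p ++ '.' :: interDot (q :: qs)

theorem lastDot?_none_of (c : Char) (rest : List Char)
    (h : lastDot? (c :: rest) = none) : lastDot? rest = none ∧ c ≠ '.' := by
  simp only [lastDot?] at h
  cases hr : lastDot? rest with
  | some k => rw [hr] at h; simp at h
  | none =>
    rw [hr] at h
    constructor
    · rfl
    · intro hc; rw [if_pos hc] at h; simp at h

theorem csplit_of_lastDot_none {cs : List Char} (h : lastDot? cs = none) :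
    csplit cs = [cs] := by
  induction cs with
  | nil => simp [csplit]
  | cons c rest ih =>
    obtain ⟨h1, h2⟩ := lastDot?_none_of c rest h
    rw [csplit, if_neg h2, ih h1]

theorem csplit_two_le_of_lastDot_some {cs : List Char} {k : Nat}
    (h : lastDot? cs = some k) : 2 ≤ (csplit cs).length := by
  induction cs generalizing k with
  | nil => simp [lastDot?] at h
  | cons c rest ih =>
    rw [csplit]
    by_cases hc : c = '.'
    · have := csplit_ne_nil rest
      cases hcs : csplit rest with
      | nil => exact absurd hcs this
      | cons p ps => simp [hc]
    · rw [if_neg hc]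
      simp only [lastDot?] at h
      cases hr : lastDot? rest with
      | none => rw [hr, if_neg hc] at h; simp at h
      | some k' =>
        have h2 := ih hr
        cases hcs : csplit rest with
        | nil => exact absurd hcs (csplit_ne_nil rest)
        | cons p ps =>
          rw [hcs] at h2
          simp at h2 ⊢
          omega

theorem interDot_cons_cons (c : Char) (p : List Char) (X : List (List Char)) :
    interDot ((c :: p) :: X) = c :: interDot (p :: X) := by
  cases X with
  | nil => simp [interDot]
  | cons q qs => simp [interDot]

theorem interDot_dropLast_eq_take :
    ∀ (cs : List Char) (k : Nat), lastDot? cs = some k →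
      interDot ((csplit cs).dropLast) = cs.take k := by
  intro cs
  induction cs with
  | nil => intro k h; simp [lastDot?] at h
  | cons c rest ih =>
    intro k h
    simp only [lastDot?] at h
    cases hr : lastDot? rest with
    | some k' =>
      rw [hr] at h
      have hk : k = k' + 1 := by simpa using h.symm
      subst hk
      have h2 := csplit_two_le_of_lastDot_some hr
      cases hcs : csplit rest with
      | nil => exact absurd hcs (csplit_ne_nil rest)
      | cons p ps =>
        rw [hcs] at h2
        cases ps with
        | nil => simp at h2
        | cons a as =>
          have hih := ih k' hr
          rw [hcs] at hih
          by_cases hc : c = '.'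
          · subst hc
            rw [csplit, if_pos rfl, hcs]
            simp only [List.dropLast_cons₂] at hih ⊢
            show interDot ([] :: p :: (a :: as).dropLast) = _
            rw [interDot, hih]
            simp
          · rw [csplit, if_neg hc, hcs]
            simp only [List.dropLast_cons₂] at hih ⊢
            rw [interDot_cons_cons, hih]
            simp
    | none =>
      rw [hr] at h
      by_cases hc : c = '.'
      · rw [if_pos hc] at h
        have hk : k = 0 := by simpa using h.symm
        subst hk
        rw [csplit, if_pos hc, csplit_of_lastDot_none hr]
        simp [interDot]
      · rw [if_neg hc] at h; simp at h

theorem loop_flatten (parts : List (List Char)) :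
    ∀ (m : Nat), m ≤ parts.length → ∀ (a : List Char),
      (PySem.List.pyRange 0 (m : Int) 1).foldl
          (fun pk i => pk ++ PySem.List.pyGetD parts i [] ++ ['.']) a =
        a ++ ((parts.take m).map (· ++ ['.'])).flatten := by
  intro m
  induction m with
  | zero =>
    intro _ a
    simp [PySem.List.pyRange_zero_natCast]
  | succ m ih =>
    intro hm a
    have hcast : ((m + 1 : Nat) : Int) = (m : Int) + 1 := by push_cast; ring
    rw [hcast, PySem.List.pyRange_one_succ_right (by positivity), List.foldl_append,
      ih (by omega) a]
    have hlt : m < parts.length := by omega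
    have htake : parts.take (m + 1) = parts.take m ++ [parts[m]] := by
      rw [List.take_add_one]
      simp [List.getElem?_eq_getElem hlt]
    rw [htake, List.map_append, List.flatten_append]
    simp [PySem.List.pyGetD_natCast, List.getD_eq_getElem?_getD, List.getElem?_eq_getElem hlt]

theorem flatten_map_eq_interDot :
    ∀ (qs : List (List Char)), qs ≠ [] →
      ((qs.map (· ++ ['.'])).flatten) = interDot qs ++ ['.'] := by
  intro qs
  induction qs with
  | nil => intro h; exact absurd rfl h
  | cons p ps ih =>
    intro _
    cases ps with
    | nil => simp [interDot]
    | cons q qs' =>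
      rw [interDot, List.map_cons, List.flatten_cons, ih (by simp)]
      simp

theorem main_eq (s : String) : parent_step s = parent_step_alt s := by
  simp only [parent_step, parent_step_alt, splitOn_eq_csplit, PySem.Str.rfind_eq]
  have hdot : ("." : String).toList = ['.'] := rfl
  rw [hdot, rfind_eq_lastDot]
  cases h : lastDot? s.toList with
  | none =>
    rw [csplit_of_lastDot_none h]
    simp
  | some k =>
    have h2 := csplit_two_le_of_lastDot_some h
    have hne : ((csplit s.toList).length == 1) = false := by
      simp only [beq_eq_false_iff_ne]; omega
    have hbne : (((k : Nat) : Int) == -1) = false := by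
      simp only [beq_eq_false_iff_ne]; omega
    rw [hne, hbne]
    simp only [Bool.false_eq_true, if_false]
    set parts := csplit s.toList with hparts
    have hn1 : ((parts.length : Int) - 1) = ((parts.length - 1 : Nat) : Int) := by
      have : 1 ≤ parts.length := by omega
      push_cast [this]; ring
    rw [hn1, loop_flatten parts (parts.length - 1) (by omega) []]
    rw [← List.dropLast_eq_take]
    have hdne : parts.dropLast ≠ [] := by
      have : parts.dropLast.length = parts.length - 1 := List.length_dropLast
      intro hnil; rw [hnil] at this; simp at this; omega
    rw [List.nil_append, flatten_map_eq_interDot parts.dropLast hdne]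
    rw [PySem.Chars.slice_eq_listSlice, PySem.List.slice_to_neg_one, List.dropLast_concat]
    rw [interDot_dropLast_eq_take s.toList k h]
    rw [PySem.Str.slice]
    rw [PySem.Chars.slice_eq_listSlice s.toList none (some (k:Int)), PySem.List.slice_to_natCast]

-- ===== VERDICT (by name: the statement is the Claim_ definition above) =====
theorem parent_step_spec : Claim_equal_parent_step := by
  intro s _
  unfold Spec_parent_step
  exact main_eq s
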